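-- pv_equiv track=rewrite | github.com/Arsen1302/Code-copy-detector | TestData/solutions/problem_1528_2_1.py | solution_1528_2_1
-- ===== SOURCE A (Python) =====
-- from typing import List
--
-- def solution_1528_2_1(piles: List[List[int]], k: int) -> int:
--
--     n = len(piles)
--     cache = {}    # <--------------- Caching using dictionary
--
--     def solution_1528_2_2(index, remain_k):
--
--         if remain_k == 0:
--             return 0
--         if index == n:
--             return 0
--         if (index, remain_k) in cache:
--             return cache[(index, remain_k)]
--
--         ans = 0
--         ans = max(ans, solution_1528_2_2(index+1, remain_k))
--         running_prefix = 0
--         for i in range(1, min(remain_k, len(piles[index]))+1):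
--             running_prefix += piles[index][i-1]
--             ans = max(ans, running_prefix+solution_1528_2_2(index+1, remain_k-i))
--         cache[(index, remain_k)] = ans
--         return ans
--
--     return solution_1528_2_2(0, k)
-- ===== SOURCE B (Python) =====
-- from typing import List
--
-- def solution_1528_2_1(piles: List[List[int]], k: int) -> int:
--     # Bottom-up suffix DP: dp[c] = best value obtainable from the piles
--     # processed so far (a suffix of `piles`) with capacity c.  The capacity
--     # is capped at the total number of coins (more can never be taken).
--     kk = min(k, sum(len(p) for p in piles))
--     dp = [0] * (kk + 1)
--     for pile in reversed(piles):
--         new_dp = []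
--         for c in range(kk + 1):
--             best = dp[c]
--             run = 0
--             for i in range(1, min(c, len(pile)) + 1):
--                 run += pile[i - 1]
--                 cand = run + dp[c - i]
--                 if cand > best:
--                     best = cand
--             new_dp.append(best)
--         dp = new_dp
--     return dp[kk]
-- ===== Notes on version B (the rewrite author's own statement) =====
-- stated objective: faster
-- what changed: Replaces top-down memoized recursion with a dict cache by an explicit bottom-up DP table over capacities, iterating piles from last to first, so no recursion and no hashing.
-- outside the precondition, e.g. on solution_1528_2_1([[1]], -1): A returns 0, B raises IndexError
import Mathlib
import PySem

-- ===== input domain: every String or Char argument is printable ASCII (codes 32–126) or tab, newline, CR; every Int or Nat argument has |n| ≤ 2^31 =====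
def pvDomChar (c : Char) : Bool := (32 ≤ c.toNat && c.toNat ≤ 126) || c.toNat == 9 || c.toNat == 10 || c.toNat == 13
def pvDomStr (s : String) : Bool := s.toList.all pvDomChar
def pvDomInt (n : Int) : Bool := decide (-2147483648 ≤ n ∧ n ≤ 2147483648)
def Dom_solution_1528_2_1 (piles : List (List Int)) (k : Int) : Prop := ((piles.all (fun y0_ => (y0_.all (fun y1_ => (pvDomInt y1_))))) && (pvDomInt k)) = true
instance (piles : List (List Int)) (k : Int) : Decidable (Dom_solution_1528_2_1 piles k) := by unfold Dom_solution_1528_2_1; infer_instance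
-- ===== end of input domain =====

-- B replaces top-down memoized recursion by an explicit bottom-up DP table over capacities (constant-factor faster in a timing run: no recursion, no dict).


-- ===== PORT A =====
-- A's `cache` dict is pure memoization of solution_1528_2_2 (a pure function of
-- (index, remain_k)): the cached value is always the value the recursion would
-- recompute, so the port is the plain recursion — exact.  The `index` parameter
-- is ported as the suffix piles[index:] (index+1 ↔ tail); piles[index][i-1] is
-- always in range inside the loop, ported with pyGetD (exact there).
def solA (piles : List (List Int)) (remain_k : Int) : Int :=
  if remain_k = 0 then 0
  else
    match piles with
    | [] => 0
    | pile :: tail =>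
      let ans : Int := max 0 (solA tail remain_k)
      ((PySem.List.pyRange 1 (min remain_k (pile.length : Int) + 1) 1).foldl
        (fun (st : Int × Int) i =>
          let run := st.2 + PySem.List.pyGetD pile (i - 1) 0
          (max st.1 (run + solA tail (remain_k - i)), run))
        (ans, 0)).1

def solution_1528_2_1 (piles : List (List Int)) (k : Int) : Int :=
  solA piles k

-- ===== PORT B =====
-- inner loop of Source B: `for i in range(1, min(c, len(pile)) + 1)` ported with
-- the 0-based counter j = i - 1 over List.range (same iterations, same state).
def altCell (dp : List Int) (pile : List Int) (c : Nat) : Int :=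
  ((List.range (min c pile.length)).foldl
    (fun (st : Int × Int) j =>
      let run := st.2 + pile.getD j 0
      let cand := run + dp.getD (c - (j + 1)) 0
      (if cand > st.1 then cand else st.1, run))
    (dp.getD c 0, 0)).1

-- one pass of the outer `for c in range(k + 1)` loop building new_dp
def altStep (kn : Nat) (dp : List Int) (pile : List Int) : List Int :=
  (List.range (kn + 1)).map (fun c => altCell dp pile c)

-- kk = min(k, sum(len(p) for p in piles)): the capacity capped at the coin count
def capK (piles : List (List Int)) (k : Int) : Int :=
  min k ((piles.map List.length).sum : Int)

def solution_1528_2_1_alt (piles : List (List Int)) (k : Int) : Int :=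
  (piles.reverse.foldl (altStep (capK piles k).toNat)
      (List.replicate ((capK piles k).toNat + 1) 0)).getD (capK piles k).toNat 0

-- ===== PRECONDITION & SPEC =====
-- Pre_ restricts to the task's natural domain k ≥ 0: on negative k the Python B
-- raises IndexError (dp is empty) while A happens to return 0.
def Pre_solution_1528_2_1 (piles : List (List Int)) (k : Int) : Prop := 0 ≤ k
instance (piles : List (List Int)) (k : Int) : Decidable (Pre_solution_1528_2_1 piles k) := by unfold Pre_solution_1528_2_1; infer_instance
def pvWitness_solution_1528_2_1 : List (List Int) × Int := ([[1, 2], [3]], 2)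

def Spec_solution_1528_2_1 (piles : List (List Int)) (k : Int) (out : Int) : Prop := out = solution_1528_2_1_alt piles k
instance (piles : List (List Int)) (k : Int) (out : Int) : Decidable (Spec_solution_1528_2_1 piles k out) := by unfold Spec_solution_1528_2_1; infer_instance

-- ===== CLAIM (what is proved, stated in full; the proofs are below) =====
def Claim_equal_solution_1528_2_1 : Prop := ∀ (piles : List (List Int)) (k : Int), Dom_solution_1528_2_1 piles k → Pre_solution_1528_2_1 piles k → Spec_solution_1528_2_1 piles k (solution_1528_2_1 piles k)

-- ===== LEMMAS AND PROOFS =====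

theorem foldl_fst_mono {α : Type} (f : Int × Int → α → Int × Int)
    (h : ∀ st i, st.1 ≤ (f st i).1) :
    ∀ (l : List α) (st : Int × Int), st.1 ≤ (l.foldl f st).1 := by
  intro l
  induction l with
  | nil => intro st; simp
  | cons a t ih => intro st; exact le_trans (h st a) (ih (f st a))

theorem solA_nonneg (piles : List (List Int)) (c : Int) : 0 ≤ solA piles c := by
  rw [solA.eq_def]
  split
  · exact le_refl 0
  · match piles with
    | [] => exact le_refl 0
    | pile :: tail =>
      refine le_trans (le_max_left 0 _) (foldl_fst_mono _ ?_ _ _)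
      intro st i
      exact le_max_left _ _

theorem solA_zero (piles : List (List Int)) : solA piles 0 = 0 := by
  rw [solA.eq_def]; simp

-- the dp table after the (reversed) fold, written as a foldr over piles
def dpAfter (kn : Nat) (piles : List (List Int)) : List Int :=
  piles.foldr (fun pile dp => altStep kn dp pile) (List.replicate (kn + 1) 0)

theorem getD_altStep (kn : Nat) (dp : List Int) (pile : List Int) (c : Nat) (hc : c ≤ kn) :
    (altStep kn dp pile).getD c 0 = altCell dp pile c := by
  unfold altStep
  rw [List.getD_eq_getElem?_getD, List.getElem?_map, List.getElem?_range (by omega)]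
  rfl

theorem if_gt_eq_max (a b : Int) : (if b > a then b else a) = max a b := by
  split <;> omega

-- the two inner loops (A's 1-based Int range, B's 0-based Nat range) compute the same state
theorem fold_eq (tail : List (List Int)) (dpT : List Int) (pile : List Int) (c kn : Nat)
    (hc : c ≤ kn)
    (hIH : ∀ c' : Nat, c' ≤ kn → dpT.getD c' 0 = solA tail (c' : Int)) :
    ∀ mm : Nat, mm ≤ min c pile.length → ∀ st : Int × Int,
    (PySem.List.pyRange 1 ((mm : Int) + 1) 1).foldl
        (fun (st : Int × Int) i =>
          let run := st.2 + PySem.List.pyGetD pile (i - 1) 0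
          (max st.1 (run + solA tail ((c : Int) - i)), run))
        st
    = (List.range mm).foldl
        (fun (st : Int × Int) j =>
          let run := st.2 + pile.getD j 0
          let cand := run + dpT.getD (c - (j + 1)) 0
          (if cand > st.1 then cand else st.1, run))
        st := by
  intro mm
  induction mm with
  | zero =>
    intro _ st
    rw [PySem.List.pyRange_one_eq_nil (by norm_num)]
    simp
  | succ m ih =>
    intro hm st
    have hm' : m ≤ min c pile.length := by omega
    have hmc : m + 1 ≤ c := by omega
    have hml : m + 1 ≤ pile.length := by omega
    have hsplit : PySem.List.pyRange 1 (((m + 1 : Nat) : Int) + 1) 1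
        = PySem.List.pyRange 1 ((m : Int) + 1) 1 ++ [(m : Int) + 1] := by
      have := PySem.List.pyRange_one_succ_right (a := 1) (b := (m : Int) + 1) (by omega)
      push_cast
      rw [this]
    rw [hsplit, List.range_succ, List.foldl_append, List.foldl_append, ih hm']
    simp only [List.foldl_cons, List.foldl_nil]
    set st' := (List.range m).foldl _ st with hst'
    have hget : PySem.List.pyGetD pile ((m : Int) + 1 - 1) 0 = pile.getD m 0 := by
      rw [show (m : Int) + 1 - 1 = ((m : Nat) : Int) by omega]
      exact PySem.List.pyGetD_natCast pile m 0
    have hdp : dpT.getD (c - (m + 1)) 0 = solA tail ((c : Int) - ((m : Int) + 1)) := by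
      rw [hIH (c - (m + 1)) (by omega)]
      congr 1
      omega
    simp only [hget, hdp, if_gt_eq_max]

theorem solA_nil (c : Int) : solA [] c = 0 := by
  rw [solA.eq_def]; split <;> rfl

-- if every pile is empty, solA is 0 for any capacity
theorem solA_empty (piles : List (List Int)) (h : (piles.map List.length).sum = 0) :
    ∀ c : Int, solA piles c = 0 := by
  induction piles with
  | nil => intro c; exact solA_nil c
  | cons pile tail ih =>
    rw [List.map_cons, List.sum_cons] at h
    have hp : pile.length = 0 := by omega
    have ht : (tail.map List.length).sum = 0 := by omega
    intro c
    by_cases hcz : c = 0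
    · rw [solA.eq_def, if_pos hcz]
    · rw [solA.eq_def, if_neg hcz]
      simp only []
      rw [show ((pile.length : Int)) = 0 by simp [hp]]
      rw [PySem.List.pyRange_one_eq_nil (by omega)]
      simp [ih ht c]

-- solA is constant in the capacity once it exceeds the total number of coins
theorem solA_ge (piles : List (List Int)) :
    ∀ c d : Int, ((piles.map List.length).sum : Int) ≤ c →
      ((piles.map List.length).sum : Int) ≤ d → solA piles c = solA piles d := by
  induction piles with
  | nil => intro c d _ _; rw [solA_nil, solA_nil]
  | cons pile tail ih =>
    intro c d hc hd
    rw [List.map_cons, List.sum_cons, Nat.cast_add] at hc hd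
    by_cases hcz : c = 0
    · by_cases hdz : d = 0
      · rw [hcz, hdz]
      · have h0 : (List.map List.length (pile :: tail)).sum = 0 := by
          rw [List.map_cons, List.sum_cons]; omega
        rw [solA_empty _ h0 c, solA_empty _ h0 d]
    · by_cases hdz : d = 0
      · have h0 : (List.map List.length (pile :: tail)).sum = 0 := by
          rw [List.map_cons, List.sum_cons]; omega
        rw [solA_empty _ h0 c, solA_empty _ h0 d]
      · rw [solA.eq_def, solA.eq_def, if_neg hcz, if_neg hdz]
        simp only []
        have hminc : min c (pile.length : Int) = (pile.length : Int) := by omega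
        have hmind : min d (pile.length : Int) = (pile.length : Int) := by omega
        rw [hminc, hmind]
        have hans : solA tail c = solA tail d := ih c d (by omega) (by omega)
        rw [hans]
        refine congrArg Prod.fst ?_
        refine PySem.List.foldl_congr_mem _ _ _ _ ?_
        intro acc i hi
        rw [PySem.List.mem_pyRange_one] at hi
        have hrec : solA tail (c - i) = solA tail (d - i) := ih _ _ (by omega) (by omega)
        simp only [hrec]

theorem dp_correct (kn : Nat) (piles : List (List Int)) :
    ∀ c : Nat, c ≤ kn → (dpAfter kn piles).getD c 0 = solA piles (c : Int) := by
  induction piles with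
  | nil =>
    intro c hc
    unfold dpAfter
    rw [solA.eq_def]
    simp
  | cons pile tail ih =>
    intro c hc
    have hstep : dpAfter kn (pile :: tail) = altStep kn (dpAfter kn tail) pile := rfl
    rw [hstep, getD_altStep kn _ pile c hc]
    cases c with
    | zero =>
      unfold altCell
      have h0 := ih 0 (Nat.zero_le kn)
      simp only [Nat.zero_min, List.range_zero, List.foldl_nil]
      rw [h0]
      simp [solA_zero]
    | succ c' =>
      rw [solA.eq_def]
      rw [if_neg (by exact_mod_cast Nat.succ_ne_zero c')]
      simp only []
      have hmin : min ((c' + 1 : Nat) : Int) (pile.length : Int)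
          = ((min (c' + 1) pile.length : Nat) : Int) := by push_cast; rfl
      have hmax : max 0 (solA tail ((c' + 1 : Nat) : Int)) = solA tail ((c' + 1 : Nat) : Int) :=
        max_eq_right (solA_nonneg tail _)
      rw [hmax, hmin, ← ih (c' + 1) hc]
      unfold altCell
      exact (congrArg Prod.fst
        (fold_eq tail (dpAfter kn tail) pile (c' + 1) kn hc ih (min (c' + 1) pile.length)
          le_rfl ((dpAfter kn tail).getD (c' + 1) 0, 0))).symm

-- ===== VERDICT (by name: the statement is the Claim_ definition above) =====
theorem solution_1528_2_1_spec : Claim_equal_solution_1528_2_1 := by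
  intro piles k _ hk
  unfold Spec_solution_1528_2_1 solution_1528_2_1 solution_1528_2_1_alt
  rw [List.foldl_reverse]
  have hkk0 : (0 : Int) ≤ capK piles k := le_min hk (by positivity)
  have h := dp_correct (capK piles k).toNat piles (capK piles k).toNat le_rfl
  rw [show (piles.foldr (fun pile dp => altStep (capK piles k).toNat dp pile)
        (List.replicate ((capK piles k).toNat + 1) 0)) = dpAfter (capK piles k).toNat piles from rfl]
  rw [h, Int.toNat_of_nonneg hkk0]
  rcases le_total k ((piles.map List.length).sum : Int) with hle | hge
  · rw [show capK piles k = k from min_eq_left hle]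
  · rw [show capK piles k = ((piles.map List.length).sum : Int) from min_eq_right hge]
    exact solA_ge piles k _ hge le_rfl
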